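-- pv_equiv track=rewrite | github.com/pypi-data/pypi-mirror-373 | packages/l6e-forge/l6e_forge-0.1.0.tar.gz/l6e_forge-0.1.0/src/l6e_forge/infra/compose.py | _parse_services_block_bounds
-- ===== SOURCE A (Python) =====
-- def _parse_services_block_bounds(text: str) -> tuple[int | None, int]:
--     """Find the start and end line indexes (exclusive end) of the top-level services block.
--
--     Returns a tuple (start_index, end_index). If services is not found at the
--     top level, start_index will be None and end_index will be len(lines).
--     """
--     lines = text.splitlines()
--     services_start: int | None = None
--     for idx, line in enumerate(lines):
--         # Top-level 'services:' line has no leading indentation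
--         if line.strip() == "services:" and (len(line) == len(line.lstrip())):
--             services_start = idx
--             break
--     if services_start is None:
--         return None, len(lines)
--     # Find next top-level key after services
--     for j in range(services_start + 1, len(lines)):
--         lj = lines[j]
--         if not lj.strip():
--             continue
--         if len(lj) == len(lj.lstrip()) and not lj.startswith("#"):
--             # Found next top-level key
--             return services_start, j
--     return services_start, len(lines)
-- ===== SOURCE B (Python) =====
-- def _parse_services_block_bounds(text: str) -> tuple:
--     """Index the top-level keys once, then look up 'services:' and its successor."""
--     lines = text.splitlines()
--     tops = [(i, l) for i, l in enumerate(lines)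
--             if l.strip() and len(l) == len(l.lstrip()) and not l.startswith("#")]
--     for k, (i, l) in enumerate(tops):
--         if l.strip() == "services:":
--             return i, (tops[k + 1][0] if k + 1 < len(tops) else len(lines))
--     return None, len(lines)
-- ===== Notes on version B (the rewrite author's own statement) =====
-- stated objective: alternative
-- what changed: B replaces A's two sequential scans (find 'services:', then index-scan for the next key) with a single pass that builds the list of all top-level-key lines and then reads the services entry and its successor off that index.
import Mathlib
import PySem

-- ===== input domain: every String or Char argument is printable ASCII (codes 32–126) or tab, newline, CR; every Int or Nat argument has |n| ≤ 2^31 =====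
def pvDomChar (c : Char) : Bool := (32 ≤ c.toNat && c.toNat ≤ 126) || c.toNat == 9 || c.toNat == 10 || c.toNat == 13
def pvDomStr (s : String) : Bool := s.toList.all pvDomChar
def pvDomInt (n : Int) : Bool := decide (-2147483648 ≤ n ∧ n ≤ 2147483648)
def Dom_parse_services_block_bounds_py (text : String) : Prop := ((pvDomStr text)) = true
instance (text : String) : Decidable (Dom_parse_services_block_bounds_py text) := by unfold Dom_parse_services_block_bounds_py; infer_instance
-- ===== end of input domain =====

-- B builds the index of top-level keys in one pass and looks 'services:' and its successor up there,
-- instead of A's two sequential scans; same asymptotic cost (objective: alternative).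

-- ===== PORT A =====
-- line.strip() == "services:" and (len(line) == len(line.lstrip()))
def pvIsServ (line : String) : Bool :=
  PySem.Str.strip line == "services:" &&
    (PySem.Str.len line == PySem.Str.len (PySem.Str.lstrip line))

-- A's first loop: for idx, line in enumerate(lines): … break
def pvFindServ : List (Int × String) → Option Int
  | [] => none
  | (idx, line) :: rest => if pvIsServ line then some idx else pvFindServ rest

-- A's second loop: for j in range(services_start + 1, len(lines)): …
def pvNextKey (lines : List String) (start : Int) : List Int → Option Int × Int
  | [] => (some start, (lines.length : Int))
  | j :: rest =>
    match PySem.List.pyGet? lines j with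
    | none => (some start, (lines.length : Int))  -- unreachable: j drawn from range(…, len(lines))
    | some lj =>
      if PySem.Str.strip lj == "" then pvNextKey lines start rest
      else if (PySem.Str.len lj == PySem.Str.len (PySem.Str.lstrip lj))
              && !(PySem.Str.startswith lj "#") then (some start, j)
      else pvNextKey lines start rest

def parse_services_block_bounds_py (text : String) : Option Int × Int :=
  let lines := PySem.Str.splitlines text
  match pvFindServ (PySem.List.enumerate lines 0) with
  | none => (none, (lines.length : Int))
  | some s => pvNextKey lines s (PySem.List.pyRange (s + 1) (lines.length : Int) 1)

-- ===== PORT B =====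
-- l.strip() and len(l) == len(l.lstrip()) and not l.startswith("#")
def pvIsTopKey (l : String) : Bool :=
  !(PySem.Str.strip l == "") &&
    (PySem.Str.len l == PySem.Str.len (PySem.Str.lstrip l)) &&
    !(PySem.Str.startswith l "#")

-- B's scan of the top-level-key index: next bound = following entry's index, else len(lines)
def pvScanTops (n : Int) : List (Int × String) → Option Int × Int
  | [] => (none, n)
  | (i, l) :: rest =>
    if PySem.Str.strip l == "services:" then
      (some i, match rest with | [] => n | (j, _) :: _ => j)
    else pvScanTops n rest

def parse_services_block_bounds_py_alt (text : String) : Option Int × Int :=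
  let lines := PySem.Str.splitlines text
  let tops := (PySem.List.enumerate lines 0).filter (fun p => pvIsTopKey p.2)
  pvScanTops (lines.length : Int) tops

-- ===== PRECONDITION & SPEC =====
def Spec_parse_services_block_bounds_py (text : String) (out : Option Int × Int) : Prop := out = parse_services_block_bounds_py_alt text
instance (text : String) (out : Option Int × Int) : Decidable (Spec_parse_services_block_bounds_py text out) := by unfold Spec_parse_services_block_bounds_py; infer_instance

-- ===== CLAIM (what is proved, stated in full; the proofs are below) =====
def Claim_equal_parse_services_block_bounds_py : Prop := ∀ (text : String), Dom_parse_services_block_bounds_py text → Spec_parse_services_block_bounds_py text (parse_services_block_bounds_py text)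

-- ===== LEMMAS AND PROOFS =====

theorem strip_hash_cons (cs : List Char) :
    ∃ ys, PySem.Chars.strip ('#' :: cs) = '#' :: ys := by
  unfold PySem.Chars.strip PySem.Chars.rstrip PySem.Chars.lstrip
  have hsp : PySem.Chars.isspace '#' = false := by decide
  rw [List.dropWhile_cons_of_neg (by simp [hsp])]
  rw [List.reverse_cons, List.dropWhile_append]
  split
  · exact ⟨[], by simp [hsp]⟩
  · exact ⟨(List.dropWhile PySem.Chars.isspace cs.reverse).reverse, by simp⟩

theorem isServ_isTopKey (l : String) (h : pvIsServ l = true) : pvIsTopKey l = true := by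
  simp only [pvIsServ, Bool.and_eq_true, beq_iff_eq] at h
  obtain ⟨h1, h2⟩ := h
  simp only [pvIsTopKey, Bool.and_eq_true, Bool.not_eq_true', beq_iff_eq, beq_eq_false_iff_ne]
  refine ⟨⟨by rw [h1]; decide, by have h2' := h2; simp at h2'; omega⟩, ?_⟩
  rw [PySem.Str.startswith_eq]
  by_contra hsw
  simp only [Bool.not_eq_false] at hsw
  have hpre : ("#".toList).isPrefixOf l.toList := hsw
  rw [List.isPrefixOf_iff_prefix] at hpre
  obtain ⟨cs, hcs⟩ := hpre
  have hl : l.toList = '#' :: cs := by simpa using hcs.symm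
  have hstrip : (PySem.Str.strip l).toList = PySem.Chars.strip l.toList := by
    simp [PySem.Str.toList_strip]
  rw [h1] at hstrip
  obtain ⟨ys, hys⟩ := strip_hash_cons cs
  rw [hl, hys] at hstrip
  simp at hstrip

theorem drop_cons_facts {α : Type} (lines tl : List α) (l : α) (j : ℕ)
    (h : lines.drop j = l :: tl) :
    j < lines.length ∧ lines[j]? = some l ∧ lines.drop (j + 1) = tl := by
  have hlen : j < lines.length := by
    by_contra hle
    rw [List.drop_eq_nil_of_le (by omega)] at h
    exact List.cons_ne_nil l tl h.symm
  refine ⟨hlen, ?_, ?_⟩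
  · have h0 : (lines.drop j)[0]? = lines[j]? := by simp
    rw [← h0, h]; rfl
  · have : lines.drop (j + 1) = (lines.drop j).drop 1 := by
      rw [List.drop_drop]
    rw [this, h]
    simp
theorem nextKey_eq (lines : List String) (start : Int) :
    ∀ (tl : List String) (j : ℕ), lines.drop j = tl →
    pvNextKey lines start (PySem.List.pyRange (j : Int) (lines.length : Int) 1) =
      (some start,
        match (PySem.List.enumerate tl (j : Int)).filter (fun p => pvIsTopKey p.2) with
        | [] => (lines.length : Int)
        | (i, _) :: _ => i) := by
  intro tl
  induction tl with
  | nil =>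
    intro j h
    have hj : (lines.length : Int) ≤ (j : Int) := by
      have := List.drop_eq_nil_iff.mp h
      exact_mod_cast this
    rw [PySem.List.pyRange_one_eq_nil hj]
    simp [pvNextKey, PySem.List.enumerate]
  | cons l tl ih =>
    intro j h
    obtain ⟨hlt, hget, hdrop⟩ := drop_cons_facts lines tl l j h
    have hlt' : (j : Int) < (lines.length : Int) := by exact_mod_cast hlt
    rw [PySem.List.pyRange_one_cons hlt']
    have hcast : (j : Int) + 1 = ((j + 1 : ℕ) : Int) := by push_cast; ring
    rw [PySem.List.enumerate_cons]
    unfold pvNextKey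
    rw [show PySem.List.pyGet? lines (j : Int) = lines[j]? from PySem.List.pyGet?_natCast lines j, hget]
    dsimp only
    by_cases hb : (PySem.Str.strip l == "") = true
    · have htk : pvIsTopKey l = false := by simp [pvIsTopKey, hb]
      rw [if_pos hb, hcast, ih (j + 1) hdrop]
      rw [List.filter_cons_of_neg (by simpa using htk)]
    · by_cases hc : ((PySem.Str.len l == PySem.Str.len (PySem.Str.lstrip l)) && !(PySem.Str.startswith l "#")) = true
      · have htk : pvIsTopKey l = true := by
          have hc' := hc
          rw [Bool.and_eq_true] at hc'
          have hlen := beq_iff_eq.mp hc'.1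
          have hsw := hc'.2
          simp at hlen hsw
          simp [pvIsTopKey, hb, hlen, hsw]
        rw [if_neg hb, if_pos hc]
        rw [List.filter_cons_of_pos (by simpa using htk)]
      · have htk : pvIsTopKey l = false := by
          simp only [pvIsTopKey]
          rw [Bool.eq_false_iff]
          intro hcon
          rw [Bool.and_eq_true, Bool.and_eq_true] at hcon
          exact hc (by rw [Bool.and_eq_true]; exact ⟨hcon.1.2, hcon.2⟩)
        rw [if_neg hb, if_neg hc, hcast, ih (j + 1) hdrop]
        rw [List.filter_cons_of_neg (by simpa using htk)]
theorem main_eq (lines : List String) :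
    ∀ (tl : List String) (j : ℕ), lines.drop j = tl →
    (match pvFindServ (PySem.List.enumerate tl (j : Int)) with
     | none => ((none : Option Int), (lines.length : Int))
     | some s => pvNextKey lines s (PySem.List.pyRange (s + 1) (lines.length : Int) 1)) =
      pvScanTops (lines.length : Int)
        ((PySem.List.enumerate tl (j : Int)).filter (fun p => pvIsTopKey p.2)) := by
  intro tl
  induction tl with
  | nil => intro j h; simp [pvFindServ, pvScanTops, PySem.List.enumerate]
  | cons l tl ih =>
    intro j h
    obtain ⟨hlt, hget, hdrop⟩ := drop_cons_facts lines tl l j h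
    have hcast : (j : Int) + 1 = ((j + 1 : ℕ) : Int) := by push_cast; ring
    rw [PySem.List.enumerate_cons]
    by_cases hs : pvIsServ l = true
    · have htk := isServ_isTopKey l hs
      rw [List.filter_cons_of_pos (by simpa using htk)]
      unfold pvFindServ pvScanTops
      rw [if_pos hs]
      have hserv : (PySem.Str.strip l == "services:") = true := by
        have := hs; simp only [pvIsServ, Bool.and_eq_true] at this; exact this.1
      rw [if_pos hserv]
      dsimp only
      rw [hcast, nextKey_eq lines (j : Int) tl (j + 1) hdrop]
    · by_cases htk : pvIsTopKey l = true
      · have hns : (PySem.Str.strip l == "services:") = false := by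
          rw [Bool.eq_false_iff]
          intro hsv
          apply hs
          simp only [pvIsTopKey, Bool.and_eq_true] at htk
          simp only [pvIsServ, Bool.and_eq_true]
          exact ⟨hsv, htk.1.2⟩
        rw [List.filter_cons_of_pos (by simpa using htk)]
        unfold pvFindServ pvScanTops
        rw [if_neg (by simpa using hs), if_neg (by simp [hns])]
        rw [hcast]
        exact ih (j + 1) hdrop
      · rw [List.filter_cons_of_neg (by simpa using htk)]
        unfold pvFindServ
        rw [if_neg (by simpa using hs), hcast]
        exact ih (j + 1) hdrop

-- ===== VERDICT (by name: the statement is the Claim_ definition above) =====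
theorem parse_services_block_bounds_py_spec : Claim_equal_parse_services_block_bounds_py := by
  intro text _
  unfold Spec_parse_services_block_bounds_py parse_services_block_bounds_py parse_services_block_bounds_py_alt
  have := main_eq (PySem.Str.splitlines text) (PySem.Str.splitlines text) 0 (by simp)
  simpa using this
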